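-- pv_equiv track=rewrite | github.com/alias-pyking/InterviewPrep | EPI/minimum_subarray_containing_all_the_entries_in_sequence.py | find_minimum_subarray_sequential
-- ===== SOURCE A (Python) =====
-- def find_minimum_subarray_sequential(paragraph, keywords):
-- 	keywords_to_idx = {k: i for i, k in enumerate(keywords)}
--
-- 	latest_occurence = [-1] * len(keywords)
-- 	shortest_subarray_length =[float('inf')]*len(keywords)
-- 	shortest_distance = float('inf')
-- 	result = (-1,-1)
-- 	for i, p in enumerate(paragraph):
-- 		if p in keywords_to_idx:
-- 			keyword_idx = keywords_to_idx[p]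
-- 			if keyword_idx == 0:
-- 				shortest_subarray_length[keyword_idx] = 1
-- 			elif shortest_subarray_length[keyword_idx - 1] != float('inf'):
-- 				distance_to_previous_keyword = (i - latest_occurence[keyword_idx - 1])
-- 				shortest_subarray_length[keyword_idx] = (
-- 					shortest_subarray_length[keyword_idx - 1] +
-- 					distance_to_previous_keyword)
-- 			latest_occurence[keyword_idx] = i
--
-- 			if keyword_idx == len(keywords) - 1 and shortest_subarray_length[-1] < shortest_distance:
-- 				shortest_distance = shortest_subarray_length[-1]
-- 				result = (i - shortest_distance + 1, i)
--
-- 	return result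
-- ===== SOURCE B (Python) =====
-- def find_minimum_subarray_sequential(paragraph, keywords):
--     keywords_to_idx = {k: i for i, k in enumerate(keywords)}
--     m = len(keywords)
--
--     def find_prev(k, pos):
--         # largest j < pos whose word is keyword k (by dict index), else None
--         j = pos - 1
--         while j >= 0 and keywords_to_idx.get(paragraph[j]) != k:
--             j -= 1
--         return j if j >= 0 else None
--
--     def chase(k, pos):
--         # start of the greedy backward match of keywords[0..k] ending at pos
--         while k > 0:
--             j = find_prev(k - 1, pos)
--             if j is None:
--                 return None
--             k, pos = k - 1, j
--         return pos
--
--     best = None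
--     result = (-1, -1)
--     for i, p in enumerate(paragraph):
--         if keywords_to_idx.get(p) != m - 1:
--             continue
--         s = chase(m - 1, i)
--         if s is None:
--             continue
--         cand = i - s + 1
--         if best is None or cand < best:
--             best = cand
--             result = (s, i)
--     return result
-- ===== Notes on version B (the rewrite author's own statement) =====
-- stated objective: alternative
-- what changed: B drops A's streaming DP state (per-keyword shortest-length and latest-occurrence arrays) entirely: for each occurrence of the last keyword it recomputes the window from scratch by a greedy backward scan that picks the nearest previous occurrence of each earlier keyword; this yields the same earliest minimal window.
import Mathlib
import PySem

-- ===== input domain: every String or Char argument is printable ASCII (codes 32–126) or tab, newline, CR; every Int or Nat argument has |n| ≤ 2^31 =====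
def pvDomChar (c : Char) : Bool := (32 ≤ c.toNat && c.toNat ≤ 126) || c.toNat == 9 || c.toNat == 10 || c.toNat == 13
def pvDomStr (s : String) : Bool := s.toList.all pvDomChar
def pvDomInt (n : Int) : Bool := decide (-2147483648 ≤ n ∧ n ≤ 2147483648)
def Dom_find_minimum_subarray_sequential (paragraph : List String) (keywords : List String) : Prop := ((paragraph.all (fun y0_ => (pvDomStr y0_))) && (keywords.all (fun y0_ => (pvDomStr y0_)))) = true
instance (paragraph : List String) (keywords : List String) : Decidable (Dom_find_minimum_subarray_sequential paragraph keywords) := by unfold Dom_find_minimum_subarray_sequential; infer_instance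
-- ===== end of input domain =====

-- B replaces A's streaming DP (per-keyword length/latest-occurrence arrays) by a per-endpoint
-- greedy backward scan that re-derives each window from scratch (objective: alternative).


-- ===== PORT A =====
-- {k: i for i, k in enumerate(keywords)} — built verbatim by both Pythons
def pvKwIdx (keywords : List String) : PySem.Dict String Int :=
  (PySem.List.enumerate keywords 0).foldl (fun d ik => d.insert ik.2 ik.1) PySem.Dict.empty

-- A's shortest_subarray_length entries and shortest_distance are float('inf') or a positive int;
-- we model them as Option Int with none = float('inf') (exact: '<'/'≠ inf' below mirror float order).
structure PvAState where
  latest : List Int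
  lens : List (Option Int)
  sd : Option Int
  res : Int × Int
deriving Repr, DecidableEq

-- x < y on {ints} ∪ {inf}, none = inf
def pvLtInf : Option Int → Option Int → Bool
  | none, _ => false
  | some _, none => true
  | some a, some b => a < b

def pvAStep (kidx : PySem.Dict String Int) (n : Int) (st : PvAState) (ip : Int × String) : PvAState :=
  match kidx.get? ip.2 with
  | none => st
  | some k =>
    let lens :=
      if k = 0 then PySem.List.pySetD st.lens k (some 1)
      else
        match PySem.List.pyGetD st.lens (k - 1) none with
        | some prev =>
          let dist := ip.1 - PySem.List.pyGetD st.latest (k - 1) (-1)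
          PySem.List.pySetD st.lens k (some (prev + dist))
        | none => st.lens
    let latest := PySem.List.pySetD st.latest k ip.1
    let last := PySem.List.pyGetD lens (-1) none
    if k = n - 1 ∧ pvLtInf last st.sd then
      { latest := latest, lens := lens, sd := last, res := (ip.1 - last.getD 0 + 1, ip.1) }
    else
      { latest := latest, lens := lens, sd := st.sd, res := st.res }

def find_minimum_subarray_sequential (paragraph : List String) (keywords : List String) : Int × Int :=
  let kidx := pvKwIdx keywords
  let st0 : PvAState :=
    { latest := List.replicate keywords.length (-1)
      lens := List.replicate keywords.length none
      sd := none
      res := (-1, -1) }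
  ((PySem.List.enumerate paragraph 0).foldl (pvAStep kidx (keywords.length : Int)) st0).res

-- ===== PORT B =====
-- keywords_to_idx.get(paragraph[j]) == k  (j is always in range in Source B; getElem? is exact there)
def pvHit (kidx : PySem.Dict String Int) (para : List String) (j : Nat) (k : Int) : Bool :=
  (para[j]?.bind (fun w => kidx.get? w)) == some k

-- find_prev(k, pos): the backward while loop of Source B, counting j = pos-1, pos-2, …, 0
def pvFindPrev (kidx : PySem.Dict String Int) (para : List String) (k : Int) : Nat → Option Nat
  | 0 => none
  | j + 1 => if pvHit kidx para j k then some j else pvFindPrev kidx para k j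

-- chase(k, pos): the outer while loop of Source B, k counts down to 0
def pvChase (kidx : PySem.Dict String Int) (para : List String) : Nat → Nat → Option Nat
  | 0, pos => some pos
  | k + 1, pos =>
    match pvFindPrev kidx para (k : Int) pos with
    | some j => pvChase kidx para k j
    | none => none

-- the main for-loop of Source B over enumerate(paragraph); state = (best, result)
def pvBLoop (kidx : PySem.Dict String Int) (para : List String) (m : Nat) :
    Nat → List String → Option Int × (Int × Int) → Option Int × (Int × Int)
  | _, [], st => st
  | i, p :: rest, st =>
    let st' :=
      if kidx.get? p = some ((m : Int) - 1) then
        match pvChase kidx para (m - 1) i with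
        | some s =>
          let cand := (i : Int) - (s : Int) + 1
          if st.1.all (fun b => cand < b) then (some cand, ((s : Int), (i : Int)))
          else st
        | none => st
      else st
    pvBLoop kidx para m (i + 1) rest st'

def find_minimum_subarray_sequential_alt (paragraph : List String) (keywords : List String) : Int × Int :=
  let kidx := pvKwIdx keywords
  (pvBLoop kidx paragraph keywords.length 0 paragraph (none, (-1, -1))).2

-- ===== PRECONDITION & SPEC =====
def Spec_find_minimum_subarray_sequential (paragraph : List String) (keywords : List String) (out : Int × Int) : Prop := out = find_minimum_subarray_sequential_alt paragraph keywords
instance (paragraph : List String) (keywords : List String) (out : Int × Int) : Decidable (Spec_find_minimum_subarray_sequential paragraph keywords out) := by unfold Spec_find_minimum_subarray_sequential; infer_instance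

-- ===== CLAIM (what is proved, stated in full; the proofs are below) =====
def Claim_equal_find_minimum_subarray_sequential : Prop := ∀ (paragraph : List String) (keywords : List String), Dom_find_minimum_subarray_sequential paragraph keywords → Spec_find_minimum_subarray_sequential paragraph keywords (find_minimum_subarray_sequential paragraph keywords)

-- ===== LEMMAS AND PROOFS =====

theorem pvKwIdx_bound_aux (ks : List String) : ∀ (s : Int) (d : PySem.Dict String Int),
    (∀ p v, d.get? p = some v → 0 ≤ v ∧ v < s) → 0 ≤ s → ∀ p v,
    ((PySem.List.enumerate ks s).foldl (fun d ik => d.insert ik.2 ik.1) d).get? p = some v →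
    0 ≤ v ∧ v < s + ks.length := by
  induction ks with
  | nil =>
    intro s d hd _ p v h
    simp only [PySem.List.enumerate_nil, List.foldl_nil] at h
    have := hd p v h
    simp only [List.length_nil]
    omega
  | cons x t ih =>
    intro s d hd hs p v h
    rw [PySem.List.enumerate_cons] at h
    simp only [List.foldl_cons] at h
    have := ih (s + 1) (d.insert x s)
      (by
        intro p v hv
        rw [PySem.Dict.get?_insert] at hv
        split at hv
        · cases hv; omega
        · have := hd p v hv; omega)
      (by omega) p v h
    simp only [List.length_cons] at *
    push_cast at this ⊢
    omega

theorem pvKwIdx_bound (keywords : List String) (p : String) (v : Int)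
    (h : (pvKwIdx keywords).get? p = some v) : 0 ≤ v ∧ v < (keywords.length : Int) := by
  have := pvKwIdx_bound_aux keywords 0 PySem.Dict.empty
    (by intro p v hv; rw [PySem.Dict.get?_empty] at hv; cases hv) (by omega) p v h
  omega

theorem pvGetD_set_self (xs : List (Option Int)) (i : Nat) (v d : Option Int) (h : i < xs.length) :
    (xs.set i v).getD i d = v := by
  simp [List.getD_eq_getElem?_getD, h]

theorem pvGetD_set_ne (xs : List (Option Int)) (i j : Nat) (v d : Option Int) (h : i ≠ j) :
    (xs.set i v).getD j d = xs.getD j d := by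
  simp [List.getD_eq_getElem?_getD, h]

theorem pvGetDI_set_self (xs : List Int) (i : Nat) (v d : Int) (h : i < xs.length) :
    (xs.set i v).getD i d = v := by
  simp [List.getD_eq_getElem?_getD, h]

theorem pvGetDI_set_ne (xs : List Int) (i j : Nat) (v d : Int) (h : i ≠ j) :
    (xs.set i v).getD j d = xs.getD j d := by
  simp [List.getD_eq_getElem?_getD, h]

theorem pvLast (xs : List (Option Int)) (n : Nat) (hn : xs.length = n) (h0 : 0 < n) :
    PySem.List.pyGetD xs (-1) none = xs.getD (n - 1) none := by
  rw [PySem.List.pyGetD_neg_one xs none (by intro hnil; rw [hnil] at hn; simp at hn; omega)]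
  rw [List.getLast_eq_getElem, List.getD_eq_getElem]
  · congr 1 <;> omega
  · omega

theorem pvFindPrev_succ (kidx : PySem.Dict String Int) (para : List String) (k : Int) (j : Nat) :
    pvFindPrev kidx para k (j + 1) =
      if pvHit kidx para j k then some j else pvFindPrev kidx para k j := rfl

theorem pvFindPrev_some (kidx : PySem.Dict String Int) (para : List String) (k : Int) :
    ∀ (n : Nat) (a : Nat), pvFindPrev kidx para k n = some a →
      pvHit kidx para a k = true ∧ a < n := by
  intro n
  induction n with
  | zero => intro a h; cases h
  | succ j ih =>
    intro a h
    rw [pvFindPrev_succ] at h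
    split at h
    · cases h; constructor <;> first | assumption | omega
    · have := ih a h; exact ⟨this.1, by omega⟩

theorem pvFindPrev_exists (kidx : PySem.Dict String Int) (para : List String) (k : Int) :
    ∀ (n : Nat) (a : Nat), a < n → pvHit kidx para a k = true →
      ∃ b, pvFindPrev kidx para k n = some b ∧ a ≤ b := by
  intro n
  induction n with
  | zero => intro a h; omega
  | succ j ih =>
    intro a ha hhit
    rw [pvFindPrev_succ]
    by_cases hj : pvHit kidx para j k = true
    · exact ⟨j, by simp [hj], by omega⟩
    · have haj : a < j := by
        by_contra hc
        have : a = j := by omega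
        subst this; exact hj hhit
      obtain ⟨b, hb, hab⟩ := ih a haj hhit
      exact ⟨b, by simp [hj, hb], hab⟩

theorem pvChase_mono (kidx : PySem.Dict String Int) (para : List String) :
    ∀ (k : Nat) (j j' : Nat), j ≤ j' → (pvChase kidx para k j).isSome →
      (pvChase kidx para k j').isSome := by
  intro k
  induction k with
  | zero => intro j j' _ _; simp [pvChase]
  | succ k ih =>
    intro j j' hle hs
    simp only [pvChase] at hs ⊢
    cases hfp : pvFindPrev kidx para (k : Int) j with
    | none => rw [hfp] at hs; simp at hs
    | some a =>
      rw [hfp] at hs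
      obtain ⟨hhit, haj⟩ := pvFindPrev_some kidx para (k : Int) j a hfp
      obtain ⟨b, hb, hab⟩ := pvFindPrev_exists kidx para (k : Int) j' a (by omega) hhit
      rw [hb]
      exact ih a b hab hs

-- helpers to state the coupling invariant without inline matches
def pvLatestI : Option Nat → Int
  | some j => (j : Int)
  | none => -1

def pvLenI (kidx : PySem.Dict String Int) (para : List String) (k : Nat) :
    Option Nat → Option Int
  | some j => Option.map (fun s : Nat => (j : Int) - (s : Int) + 1) (pvChase kidx para k j)
  | none => none

-- the coupling invariant for A's state after its loop has consumed the first i words: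
-- latest[k] is the last hit of keyword k before i, lens[k] the greedy window length ending there
def PvInvA (kidx : PySem.Dict String Int) (para : List String) (m : Nat) (i : Nat)
    (a : PvAState) : Prop :=
  a.latest.length = m ∧ a.lens.length = m ∧
  (∀ k, k < m →
    a.latest.getD k (-1) = pvLatestI (pvFindPrev kidx para (k : Int) i) ∧
    a.lens.getD k none = pvLenI kidx para k (pvFindPrev kidx para (k : Int) i))

theorem pvInvA_init (kidx : PySem.Dict String Int) (para : List String) (m : Nat) :
    PvInvA kidx para m 0
      { latest := List.replicate m (-1), lens := List.replicate m none,
        sd := none, res := (-1, -1) } := by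
  refine ⟨by simp, by simp, ?_⟩
  intro k hk
  constructor <;> simp [pvFindPrev, pvLatestI, pvLenI, List.getD_eq_getElem?_getD, hk]

theorem pvStepInv (kidx : PySem.Dict String Int) (para : List String) (m : Nat) (i : Nat)
    (p : String) (a : PvAState)
    (hbound : ∀ q v, kidx.get? q = some v → 0 ≤ v ∧ v < (m : Int))
    (hp : para[i]? = some p)
    (hinv : PvInvA kidx para m i a) :
    PvInvA kidx para m (i + 1) (pvAStep kidx (m : Int) a ((i : Int), p)) ∧
    ((pvAStep kidx (m : Int) a ((i : Int), p)).sd,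
     (pvAStep kidx (m : Int) a ((i : Int), p)).res) =
      (if kidx.get? p = some ((m : Int) - 1) then
        match pvChase kidx para (m - 1) i with
        | some s =>
          let cand := (i : Int) - (s : Int) + 1
          if a.sd.all (fun b => cand < b) then (some cand, ((s : Int), (i : Int)))
          else (a.sd, a.res)
        | none => (a.sd, a.res)
      else (a.sd, a.res)) := by
  obtain ⟨hTlen, hElen, hK⟩ := hinv
  cases h : kidx.get? p with
  | none =>
    have hhit : ∀ k' : Int, pvHit kidx para i k' = false := by
      intro k'; simp [pvHit, hp, h]
    have hfp : ∀ k' : Int, pvFindPrev kidx para k' (i + 1) = pvFindPrev kidx para k' i := by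
      intro k'; rw [pvFindPrev_succ, hhit]; simp
    simp only [pvAStep, h]
    refine ⟨⟨hTlen, hElen, ?_⟩, by simp⟩
    intro k hk
    rw [hfp]
    exact hK k hk
  | some kk =>
    obtain ⟨hk0, hkm⟩ := hbound p kk h
    obtain ⟨j, rfl⟩ : ∃ j : Nat, kk = (j : Int) := ⟨kk.toNat, (Int.toNat_of_nonneg hk0).symm⟩
    have hjm : j < m := by exact_mod_cast hkm
    have hhit : ∀ k' : Int, pvHit kidx para i k' = decide ((j : Int) = k') := by
      intro k'; simp [pvHit, hp, h, beq_eq_decide]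
    have hfp : ∀ k' : Int, pvFindPrev kidx para k' (i + 1) =
        if (j : Int) = k' then some i else pvFindPrev kidx para k' i := by
      intro k'
      rw [pvFindPrev_succ, hhit]
      by_cases hc : (j : Int) = k' <;> simp [hc]
    by_cases hj0 : j = 0
    · -- keyword index 0: the chain restarts at i
      subst hj0
      have hfp0 : pvFindPrev kidx para 0 (i + 1) = some i := by
        have := hfp 0; simpa using this
      have hfpne : ∀ k' : Int, k' ≠ 0 →
          pvFindPrev kidx para k' (i + 1) = pvFindPrev kidx para k' i := by
        intro k' hk'
        rw [hfp]
        simp [Ne.symm hk']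
      simp only [pvAStep, h, Nat.cast_zero, reduceIte,
        PySem.List.pySetD_of_nonneg _ _ (show (0:Int) ≤ 0 by omega), Int.toNat_zero]
      have hKnew : ∀ k, k < m →
          (a.latest.set 0 (i : Int)).getD k (-1) =
            pvLatestI (pvFindPrev kidx para (k : Int) (i + 1)) ∧
          (a.lens.set 0 (some 1)).getD k none =
            pvLenI kidx para k (pvFindPrev kidx para (k : Int) (i + 1)) := by
        intro k hk
        by_cases hk0' : k = 0
        · subst hk0'
          rw [pvGetDI_set_self a.latest 0 _ _ (by omega), pvGetD_set_self a.lens 0 _ _ (by omega)]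
          rw [show ((0:Nat):Int) = 0 from rfl, hfp0]
          refine ⟨rfl, ?_⟩
          simp only [pvLenI, pvChase, Option.map_some, Option.some.injEq]
          omega
        · have hkc : ((k:Nat):Int) ≠ 0 := by exact_mod_cast hk0'
          rw [pvGetDI_set_ne _ _ _ _ _ (fun hh => hk0' hh.symm),
              pvGetD_set_ne _ _ _ _ _ (fun hh => hk0' hh.symm), hfpne _ hkc]
          exact hK k hk
      have hlast : PySem.List.pyGetD (a.lens.set 0 (some 1)) (-1) none =
          (a.lens.set 0 (some 1)).getD (m - 1) none :=
        pvLast _ m (by simp [hElen]) (by omega)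
      by_cases hm1 : (0:Int) = (m:Int) - 1
      · -- m = 1: the single keyword is also the last one
        have hm : m = 1 := by omega
        subst hm
        have hget : (a.lens.set 0 (some 1)).getD 0 none = some 1 :=
          pvGetD_set_self a.lens 0 _ _ (by omega)
        rw [if_pos (congrArg some hm1), hlast]
        simp only [Nat.sub_self, hget]
        have hch : pvChase kidx para 0 i = some i := rfl
        simp only [hch]
        cases hsd : a.sd with
        | none =>
          rw [if_pos ⟨hm1, by simp [pvLtInf]⟩, if_pos (by simp)]
          refine ⟨⟨by simp [hTlen], by simp [hElen], hKnew⟩, ?_⟩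
          simp only [Option.getD_some]
          simp
        | some d =>
          by_cases hlt : (1:Int) < d
          · rw [if_pos ⟨hm1, by simp [pvLtInf, hlt]⟩,
                if_pos (show (some d).all (fun b => (i:Int) - (i:Int) + 1 < b) = true by
                  simp [hlt])]
            refine ⟨⟨by simp [hTlen], by simp [hElen], hKnew⟩, ?_⟩
            simp only [Option.getD_some]
            simp
          · rw [if_neg (fun hc => hlt (by simpa [pvLtInf] using hc.2)),
                if_neg (show ¬ (some d).all (fun b => (i:Int) - (i:Int) + 1 < b) = true by
                  simp [hlt])]
            exact ⟨⟨by simp [hTlen], by simp [hElen], hKnew⟩, rfl⟩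
      · rw [if_neg (fun hc => hm1 hc.1), if_neg (fun hc => hm1 (by simpa using hc))]
        exact ⟨⟨by simp [hTlen], by simp [hElen], hKnew⟩, rfl⟩
    · -- keyword index j = jj + 1 ≥ 1
      obtain ⟨jj, rfl⟩ : ∃ jj, j = jj + 1 := ⟨j - 1, by omega⟩
      have hne0 : ¬ ((jj + 1 : Nat) : Int) = 0 := by push_cast; omega
      have hc1 : ((jj + 1 : Nat) : Int) - 1 = ((jj : Nat) : Int) := by push_cast; ring
      have hBguard : (some ((jj + 1 : Nat) : Int) = some ((m:Int) - 1)) ↔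
          ((jj + 1 : Nat) : Int) = (m:Int) - 1 := by simp
      have hfpj : pvFindPrev kidx para ((jj + 1 : Nat) : Int) (i + 1) = some i := by
        rw [hfp]; simp
      have hfpne : ∀ k : Nat, k ≠ jj + 1 →
          pvFindPrev kidx para (k : Int) (i + 1) = pvFindPrev kidx para (k : Int) i := by
        intro k hk
        rw [hfp]
        have hne : ¬ ((jj + 1 : Nat) : Int) = (k : Int) := by exact_mod_cast Ne.symm hk
        rw [if_neg hne]
      simp only [pvAStep, h, if_neg hne0, hc1, PySem.List.pyGetD_natCast,
        PySem.List.pySetD_natCast]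
      obtain ⟨hTjj, hEjj⟩ := hK jj (by omega)
      cases hprev : a.lens.getD jj none with
      | some Lp =>
        rw [hprev] at hEjj
        cases hfpi : pvFindPrev kidx para ((jj : Nat) : Int) i with
        | none => rw [hfpi] at hEjj; simp [pvLenI] at hEjj
        | some jp =>
          rw [hfpi] at hEjj hTjj
          simp only [pvLenI, pvLatestI] at hEjj hTjj
          obtain ⟨s', hs', hLp⟩ : ∃ s', pvChase kidx para jj jp = some s' ∧
              Lp = (jp : Int) - (s' : Int) + 1 := by
            cases hch : pvChase kidx para jj jp with
            | none => rw [hch] at hEjj; simp at hEjj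
            | some s' =>
              rw [hch] at hEjj
              simp only [Option.map_some, Option.some.injEq] at hEjj
              exact ⟨s', rfl, hEjj⟩
          have hchi : pvChase kidx para (jj + 1) i = some s' := by
            simp only [pvChase]
            rw [hfpi]
            exact hs'
          rw [hTjj]
          have hKnew : ∀ k, k < m →
              (a.latest.set (jj + 1) (i : Int)).getD k (-1) =
                pvLatestI (pvFindPrev kidx para (k : Int) (i + 1)) ∧
              (a.lens.set (jj + 1) (some (Lp + ((i:Int) - (jp:Int))))).getD k none =
                pvLenI kidx para k (pvFindPrev kidx para (k : Int) (i + 1)) := by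
            intro k hk
            by_cases hkj : k = jj + 1
            · subst hkj
              rw [pvGetDI_set_self a.latest (jj + 1) _ _ (by omega),
                  pvGetD_set_self a.lens (jj + 1) _ _ (by omega), hfpj]
              simp only [pvLatestI, pvLenI, hchi, Option.map_some, Option.some.injEq]
              exact ⟨by trivial, by omega⟩
            · rw [pvGetDI_set_ne _ _ _ _ _ (fun hh => hkj hh.symm),
                  pvGetD_set_ne _ _ _ _ _ (fun hh => hkj hh.symm), hfpne k hkj]
              exact hK k hk
          have hlast : PySem.List.pyGetD
              (a.lens.set (jj + 1) (some (Lp + ((i:Int) - (jp:Int))))) (-1) none =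
              (a.lens.set (jj + 1) (some (Lp + ((i:Int) - (jp:Int))))).getD (m - 1) none :=
            pvLast _ m (by simp [hElen]) (by omega)
          by_cases hlastk : ((jj + 1 : Nat) : Int) = (m:Int) - 1
          · have hm1 : m - 1 = jj + 1 := by omega
            have hget : (a.lens.set (jj + 1)
                (some (Lp + ((i:Int) - (jp:Int))))).getD (m - 1) none
                = some (Lp + ((i:Int) - (jp:Int))) := by
              rw [hm1]
              exact pvGetD_set_self a.lens (jj + 1) _ _ (by omega)
            rw [if_pos (hBguard.mpr hlastk), hlast, hget, hm1]
            simp only [hchi]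
            cases hsd : a.sd with
            | none =>
              rw [if_pos ⟨hlastk, by simp [pvLtInf]⟩, if_pos (by simp)]
              refine ⟨⟨by simp [hTlen], by simp [hElen], hKnew⟩, ?_⟩
              simp only [Option.getD_some]
              simp [Prod.ext_iff] <;> omega
            | some d =>
              by_cases hlt : Lp + ((i:Int) - (jp:Int)) < d
              · rw [if_pos ⟨hlastk, by simp [pvLtInf, hlt]⟩,
                    if_pos (show (some d).all (fun b => (i:Int) - (s':Int) + 1 < b) = true by
                      simp; omega)]
                refine ⟨⟨by simp [hTlen], by simp [hElen], hKnew⟩, ?_⟩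
                simp only [Option.getD_some]
                simp [Prod.ext_iff] <;> omega
              · rw [if_neg (fun hc => hlt (by simpa [pvLtInf] using hc.2)),
                    if_neg (show ¬ (some d).all (fun b => (i:Int) - (s':Int) + 1 < b) = true by
                      simp; omega)]
                exact ⟨⟨by simp [hTlen], by simp [hElen], hKnew⟩, rfl⟩
          · rw [if_neg (fun hc => hlastk hc.1), if_neg (fun hc => hlastk (hBguard.mp hc))]
            exact ⟨⟨by simp [hTlen], by simp [hElen], hKnew⟩, rfl⟩
      | none =>
        rw [hprev] at hEjj
        have hchaseNone : pvChase kidx para (jj + 1) i = none := by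
          simp only [pvChase]
          cases hfpi : pvFindPrev kidx para ((jj : Nat) : Int) i with
          | none => rfl
          | some jp =>
            rw [hfpi] at hEjj
            simp only [pvLenI] at hEjj
            cases hch : pvChase kidx para jj jp with
            | none => exact hch
            | some s0 => rw [hch] at hEjj; simp at hEjj
        have hLjnone : a.lens.getD (jj + 1) none = none := by
          obtain ⟨_, hEj⟩ := hK (jj + 1) hjm
          rw [hEj]
          cases hfo : pvFindPrev kidx para ((jj + 1 : Nat) : Int) i with
          | none => rfl
          | some jo =>
            simp only [pvLenI]
            cases hcho : pvChase kidx para (jj + 1) jo with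
            | none => simp
            | some s0 =>
              exfalso
              obtain ⟨q, hq, hcq⟩ : ∃ q, pvFindPrev kidx para ((jj : Nat) : Int) jo = some q ∧
                  pvChase kidx para jj q = some s0 := by
                simp only [pvChase] at hcho
                cases hq : pvFindPrev kidx para ((jj : Nat) : Int) jo with
                | none => rw [hq] at hcho; cases hcho
                | some q => rw [hq] at hcho; exact ⟨q, rfl, hcho⟩
              obtain ⟨hhitq, hqjo⟩ := pvFindPrev_some kidx para _ jo q hq
              obtain ⟨_, hjoi⟩ := pvFindPrev_some kidx para _ i jo hfo
              obtain ⟨b, hb, hqb⟩ := pvFindPrev_exists kidx para _ i q (by omega) hhitq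
              have hbs : (pvChase kidx para jj b).isSome :=
                pvChase_mono kidx para jj q b hqb (by rw [hcq]; rfl)
              rw [hb] at hEjj
              simp only [pvLenI] at hEjj
              cases hcb : pvChase kidx para jj b with
              | none => rw [hcb] at hbs; simp at hbs
              | some sb => rw [hcb] at hEjj; simp at hEjj
        have hKnew : ∀ k, k < m →
            (a.latest.set (jj + 1) (i : Int)).getD k (-1) =
              pvLatestI (pvFindPrev kidx para (k : Int) (i + 1)) ∧
            a.lens.getD k none =
              pvLenI kidx para k (pvFindPrev kidx para (k : Int) (i + 1)) := by
          intro k hk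
          by_cases hkj : k = jj + 1
          · subst hkj
            rw [pvGetDI_set_self a.latest (jj + 1) _ _ (by omega), hfpj, hLjnone]
            simp only [pvLatestI, pvLenI, hchaseNone, Option.map_none]
            exact ⟨by trivial, by trivial⟩
          · rw [pvGetDI_set_ne _ _ _ _ _ (fun hh => hkj hh.symm), hfpne k hkj]
            exact hK k hk
        have hlast : PySem.List.pyGetD a.lens (-1) none = a.lens.getD (m - 1) none :=
          pvLast _ m hElen (by omega)
        by_cases hlastk : ((jj + 1 : Nat) : Int) = (m:Int) - 1
        · have hm1 : m - 1 = jj + 1 := by omega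
          rw [if_pos (hBguard.mpr hlastk), hlast, hm1, hLjnone]
          simp only [hchaseNone]
          rw [if_neg (fun hc => by simpa [pvLtInf] using hc.2)]
          exact ⟨⟨by simp [hTlen], hElen, hKnew⟩, rfl⟩
        · rw [if_neg (fun hc => hlastk hc.1), if_neg (fun hc => hlastk (hBguard.mp hc))]
          exact ⟨⟨by simp [hTlen], hElen, hKnew⟩, rfl⟩

theorem pvMain (kidx : PySem.Dict String Int) (para : List String) (m : Nat)
    (hbound : ∀ q v, kidx.get? q = some v → 0 ≤ v ∧ v < (m : Int)) :
    ∀ (rest : List String) (i : Nat) (a : PvAState),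
      para.drop i = rest → PvInvA kidx para m i a →
      (((PySem.List.enumerate rest (i : Int)).foldl (pvAStep kidx (m : Int)) a).sd,
       ((PySem.List.enumerate rest (i : Int)).foldl (pvAStep kidx (m : Int)) a).res) =
        pvBLoop kidx para m i rest (a.sd, a.res) := by
  intro rest
  induction rest with
  | nil => intro i a _ _; simp [PySem.List.enumerate_nil, pvBLoop]
  | cons p rest ih =>
    intro i a hdrop hinv
    have hp : para[i]? = some p := by
      have h0 : (para.drop i)[0]? = para[i + 0]? := List.getElem?_drop
      rw [hdrop] at h0
      simpa using h0.symm
    have hdrop' : para.drop (i + 1) = rest := by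
      have h1 : List.drop 1 (List.drop i para) = List.drop (i + 1) para := List.drop_drop
      rw [← h1, hdrop]
      rfl
    obtain ⟨hinv', hstep⟩ := pvStepInv kidx para m i p a hbound hp hinv
    rw [PySem.List.enumerate_cons]
    simp only [List.foldl_cons]
    have hcast : (i : Int) + 1 = ((i + 1 : Nat) : Int) := by push_cast; ring
    rw [hcast]
    rw [ih (i + 1) _ hdrop' hinv']
    simp only [pvBLoop]
    rw [hstep]

-- ===== VERDICT (by name: the statement is the Claim_ definition above) =====
theorem find_minimum_subarray_sequential_spec : Claim_equal_find_minimum_subarray_sequential := by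
  intro paragraph keywords _
  unfold Spec_find_minimum_subarray_sequential
  unfold find_minimum_subarray_sequential find_minimum_subarray_sequential_alt
  have h := pvMain (pvKwIdx keywords) paragraph keywords.length
    (pvKwIdx_bound keywords) paragraph 0
    { latest := List.replicate keywords.length (-1)
      lens := List.replicate keywords.length none
      sd := none
      res := (-1, -1) }
    (by simp) (pvInvA_init _ _ _)
  simp only [Nat.cast_zero] at h
  exact congrArg Prod.snd h
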